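-- pv_equiv track=rewrite | github.com/lkcbharath/Lab_Assignments | 4th Semester/IT250 OS/Lab 6/lru_ram.py | lru_index
-- ===== SOURCE A (Python) =====
-- def lru_index(ram,ref_list):
--     return_index = -1
--     least_index = len(ref_list)
--     for i in range(len(ram)):
--         ram_index = len(ref_list) - 1 - ref_list[::-1].index(ram[i])
--         if ram_index < least_index:
--             least_index = ram_index
--             return_index = i
--
--     return return_index
-- ===== SOURCE B (Python) =====
-- def lru_index(ram, ref_list):
--     # Reverse scan of ref_list: the last distinct ram-value encountered (i.e. the
--     # one whose most recent reference is earliest) is the LRU page.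
--     if not ram:
--         return -1
--     need = set(ram)
--     seen = set()
--     last = None
--     for v in reversed(ref_list):
--         if v in need and v not in seen:
--             seen.add(v)
--             last = v
--             if len(seen) == len(need):
--                 break
--     if len(seen) != len(need):
--         raise ValueError("some page in ram is never referenced in ref_list")
--     return ram.index(last)
-- ===== Notes on version B (the rewrite author's own statement) =====
-- stated objective: faster
-- what changed: B scans ref_list once in reverse maintaining a seen-set of ram pages with an early break; the last distinct ram page encountered is the LRU, returned via ram.index — A's per-ram-entry reversed-copy-and-.index inner scan disappears.
import Mathlib
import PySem

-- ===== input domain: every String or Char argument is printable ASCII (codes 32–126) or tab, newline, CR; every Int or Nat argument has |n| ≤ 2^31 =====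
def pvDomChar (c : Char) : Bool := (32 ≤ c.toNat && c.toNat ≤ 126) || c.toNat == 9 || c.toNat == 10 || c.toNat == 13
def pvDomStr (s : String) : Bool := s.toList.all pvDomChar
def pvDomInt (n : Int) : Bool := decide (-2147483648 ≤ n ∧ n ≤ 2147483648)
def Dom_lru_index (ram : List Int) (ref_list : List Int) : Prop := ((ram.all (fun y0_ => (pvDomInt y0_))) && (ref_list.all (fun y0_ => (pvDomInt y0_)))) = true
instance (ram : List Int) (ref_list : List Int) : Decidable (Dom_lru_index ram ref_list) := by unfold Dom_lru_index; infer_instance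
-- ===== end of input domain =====

-- B replaces A's per-ram-entry reversed-copy-and-.index scans by one reverse scan of
-- ref_list with a seen-set and early break (objective: faster, measured by the check).

-- ===== PORT A =====
-- literal port of A: argmin loop over range(len(ram)); each step computes
-- len(ref_list) - 1 - ref_list[::-1].index(ram[i]). index? returns none exactly where
-- Python's .index raises ValueError (excluded by Pre_); the .getD 0 only totalizes that case.
def lru_index (ram : List Int) (ref_list : List Int) : Int :=
  let st := (PySem.List.pyRange 0 (PySem.List.len ram) 1).foldl
    (fun (st : Int × Int) i =>
      let ram_index : Int := PySem.List.len ref_list - 1 -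
        ((PySem.List.index? ((PySem.List.slice? ref_list none none (-1)).getD [])
          (PySem.List.pyGetD ram i 0)).getD 0 : Nat)
      if ram_index < st.2 then (i, ram_index) else st)
    (-1, PySem.List.len ref_list)
  st.1

-- ===== PORT B =====
-- the reverse scan of Source B: walk reversed ref_list, collect distinct ram pages into a
-- seen-set, remember the last one added, break once the set covers all of set(ram)
def lruScan (need : PySem.Set Int) : List Int → PySem.Set Int → Option Int → PySem.Set Int × Option Int
  | [], seen, last => (seen, last)
  | v :: vs, seen, last =>
    if PySem.Set.contains need v && !(PySem.Set.contains seen v) then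
      let seen' := PySem.Set.add seen v
      if PySem.Set.len seen' == PySem.Set.len need then (seen', some v)
      else lruScan need vs seen' (some v)
    else lruScan need vs seen last

-- literal port of Source B. The incomplete-coverage branch is Source B's 'raise ValueError'
-- (excluded by Pre_; 0 is the raise placeholder), and last.getD 0 / (index? ...).getD 0
-- only totalize cases the Python cannot reach there (last = None / a page not in ram).
def lru_index_alt (ram : List Int) (ref_list : List Int) : Int :=
  if ram = [] then -1
  else
    let need := PySem.Set.ofList ram
    let r := lruScan need ref_list.reverse PySem.Set.empty none
    if PySem.Set.len r.1 ≠ PySem.Set.len need then 0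
    else ((PySem.List.index? ram (r.2.getD 0)).getD 0 : Nat)

-- ===== PRECONDITION & SPEC =====
-- A raises ValueError from .index exactly when some ram page never occurs in ref_list
-- (B raises ValueError on the same inputs, from its explicit coverage check).
def Pre_lru_index (ram : List Int) (ref_list : List Int) : Prop :=
  ∀ v ∈ ram, v ∈ ref_list
instance (ram : List Int) (ref_list : List Int) : Decidable (Pre_lru_index ram ref_list) := by
  unfold Pre_lru_index; infer_instance

def pvWitness_lru_index : List Int × List Int := ([3, 1, 2], [1, 2, 3, 2, 1])

def Spec_lru_index (ram : List Int) (ref_list : List Int) (out : Int) : Prop := out = lru_index_alt ram ref_list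
instance (ram : List Int) (ref_list : List Int) (out : Int) : Decidable (Spec_lru_index ram ref_list out) := by unfold Spec_lru_index; infer_instance

-- ===== CLAIM (what is proved, stated in full; the proofs are below) =====
def Claim_equal_lru_index : Prop := ∀ (ram : List Int) (ref_list : List Int), Dom_lru_index ram ref_list → Pre_lru_index ram ref_list → Spec_lru_index ram ref_list (lru_index ram ref_list)

-- ===== LEMMAS AND PROOFS =====

lemma lruScan_cons (need : PySem.Set Int) (v : Int) (vs : List Int) (seen : PySem.Set Int) (last : Option Int) :
    lruScan need (v :: vs) seen last =
      if PySem.Set.contains need v && !(PySem.Set.contains seen v) then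
        (if PySem.Set.len (PySem.Set.add seen v) == PySem.Set.len need then (PySem.Set.add seen v, some v)
         else lruScan need vs (PySem.Set.add seen v) (some v))
      else lruScan need vs seen last := rfl

lemma lruScan_char (need : PySem.Set Int) (hneed : need.Nodup) :
    ∀ (r : List Int) (seen : PySem.Set Int) (last : Option Int),
      seen.Nodup → (∀ x ∈ seen, x ∈ need) →
      (∃ w ∈ need, w ∉ seen) →
      (∀ w ∈ need, w ∉ seen → w ∈ r) →
      ∃ (v : Int) (S : PySem.Set Int),
        lruScan need r seen last = (S, some v) ∧
        v ∈ need ∧ v ∉ seen ∧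
        PySem.Set.len S = PySem.Set.len need ∧
        (∀ w ∈ need, w ∉ seen → r.idxOf w ≤ r.idxOf v) := by
  intro r
  induction r with
  | nil =>
    intro seen last _ _ ⟨w, hw, hws⟩ hrem
    exact absurd (hrem w hw hws) (List.not_mem_nil)
  | cons v vs ih =>
    intro seen last hnd hsub hne hrem
    by_cases hcond : v ∈ need ∧ v ∉ seen
    · have hb : (PySem.Set.contains need v && !(PySem.Set.contains seen v)) = true := by
        simp [hcond.1, hcond.2]
      have hadd : PySem.Set.add seen v = seen ++ [v] := PySem.Set.add_of_not_mem hcond.2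
      have hnd' : (seen ++ [v]).Nodup := by
        rw [List.nodup_append]
        refine ⟨hnd, List.nodup_singleton v, ?_⟩
        intro a ha b hb
        simp only [List.mem_singleton] at hb
        subst hb
        exact fun h => hcond.2 (h ▸ ha)
      have hsub' : ∀ x ∈ seen ++ [v], x ∈ need := by
        intro x hx
        rcases List.mem_append.mp hx with h | h
        · exact hsub x h
        · simp only [List.mem_singleton] at h; subst h; exact hcond.1
      by_cases hfull : (seen ++ [v]).length = need.length
      · -- break: the set is complete, v is the final 'last'
        have hall : ∀ w ∈ need, w ∈ seen ++ [v] := by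
          intro w hw
          have hp : (seen ++ [v]).Perm need :=
            List.Subperm.perm_of_length_le (List.subperm_of_subset hnd' hsub') (le_of_eq hfull.symm)
          exact hp.mem_iff.mpr hw
        refine ⟨v, seen ++ [v], ?_, hcond.1, hcond.2,
          by unfold PySem.Set.len; exact_mod_cast hfull, ?_⟩
        · rw [lruScan_cons, if_pos hb, hadd,
            if_pos (by unfold PySem.Set.len; simp [hfull])]
        · intro w hw hws
          rcases List.mem_append.mp (hall w hw) with h | h
          · exact absurd h hws
          · simp only [List.mem_singleton] at h
            subst h; exact le_refl _
      · -- no break yet: recurse with seen' = seen ++ [v]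
        have hne' : ∃ w ∈ need, w ∉ seen ++ [v] := by
          by_contra hc
          have hc' : ∀ w ∈ need, w ∈ seen ++ [v] := by
            intro w hw; by_contra hx; exact hc ⟨w, hw, hx⟩
          have : need.length ≤ (seen ++ [v]).length :=
            List.Subperm.length_le (List.subperm_of_subset hneed hc')
          have : (seen ++ [v]).length ≤ need.length :=
            List.Subperm.length_le (List.subperm_of_subset hnd' hsub')
          omega
        have hrem' : ∀ w ∈ need, w ∉ seen ++ [v] → w ∈ vs := by
          intro w hw hws
          have hwv : w ≠ v := by intro h; subst h; simp at hws
          rcases List.mem_cons.mp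
            (hrem w hw (fun h => hws (List.mem_append.mpr (Or.inl h)))) with h | h
          · exact absurd h hwv
          · exact h
        obtain ⟨v', S, heq, hv'n, hv's, hlen, hmax⟩ := ih (seen ++ [v]) (some v) hnd' hsub' hne' hrem'
        have hv'v : v' ≠ v := fun h => hv's (by simp [h])
        refine ⟨v', S, ?_, hv'n, fun h => hv's (List.mem_append.mpr (Or.inl h)), hlen, ?_⟩
        · rw [lruScan_cons, if_pos hb, hadd,
            if_neg (by unfold PySem.Set.len; simp only [beq_iff_eq, Nat.cast_inj]; exact hfull)]
          exact heq
        · intro w hw hws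
          by_cases hwv : w = v
          · subst hwv
            simp [List.idxOf_cons_self]
          · rw [List.idxOf_cons_ne vs (fun h => hwv h.symm),
                List.idxOf_cons_ne vs (fun h => hv'v h.symm)]
            have := hmax w hw (by
              intro h
              rcases List.mem_append.mp h with h | h
              · exact hws h
              · simp only [List.mem_singleton] at h; exact hwv h)
            omega
    · -- skipped element: either not a ram page or already seen
      have hb : (PySem.Set.contains need v && !(PySem.Set.contains seen v)) = false := by
        by_cases h1 : v ∈ need
        · have h2 : v ∈ seen := by
            by_contra h2; exact hcond ⟨h1, h2⟩
          simp [h2]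
        · simp [h1]
      have hvseen : ∀ w ∈ need, w ∉ seen → w ≠ v := by
        intro w hw hws h; subst h; exact hcond ⟨hw, hws⟩
      have hrem' : ∀ w ∈ need, w ∉ seen → w ∈ vs := by
        intro w hw hws
        rcases List.mem_cons.mp (hrem w hw hws) with h | h
        · exact absurd h (hvseen w hw hws)
        · exact h
      obtain ⟨v', S, heq, hv'n, hv's, hlen, hmax⟩ := ih seen last hnd hsub hne hrem'
      refine ⟨v', S, ?_, hv'n, hv's, hlen, ?_⟩
      · rw [lruScan_cons, if_neg (by rw [hb]; simp)]
        exact heq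
      · intro w hw hws
        rw [List.idxOf_cons_ne vs (fun h => (hvseen w hw hws) h.symm),
            List.idxOf_cons_ne vs (fun h => (hvseen v' hv'n hv's) h.symm)]
        have := hmax w hw hws
        omega
-- generic argmin-fold helpers
def argStep (f : Int → Int) (st : Int × Int) (iv : Int × Int) : Int × Int :=
  if f iv.2 < st.2 then (iv.1, f iv.2) else st

lemma argfold_gt (f : Int → Int) (c : Int) (l : List (Int × Int)) :
    ∀ st : Int × Int, c < st.2 → (∀ p ∈ l, c < f p.2) → c < (l.foldl (argStep f) st).2 := by
  induction l with
  | nil => intro st h _; simpa using h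
  | cons p t ih =>
    intro st h hall
    simp only [List.foldl_cons]
    apply ih
    · unfold argStep
      split_ifs with hc
      · exact hall p (by simp)
      · exact h
    · exact fun q hq => hall q (by simp [hq])

lemma argfold_fix (f : Int → Int) (i m : Int) (l : List (Int × Int))
    (hall : ∀ p ∈ l, m ≤ f p.2) : l.foldl (argStep f) (i, m) = (i, m) := by
  induction l with
  | nil => rfl
  | cons p t ih =>
    simp only [List.foldl_cons]
    rw [show argStep f (i, m) p = (i, m) from by
      unfold argStep; rw [if_neg (by exact not_lt.mpr (hall p (by simp)))]]
    exact ih (fun q hq => hall q (by simp [hq]))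

lemma idxOf_le_of_getElem (xs : List Int) (v : Int) (j : Nat) (hj : j < xs.length) (h : xs[j] = v) :
    xs.idxOf v ≤ j := by
  show xs.findIdx (· == v) ≤ j
  by_contra hc
  simp only [not_le] at hc
  have := List.not_of_lt_findIdx (p := (· == v)) (xs := xs) hc
  simp only [beq_eq_false_iff_ne, ne_eq] at this
  exact this h

lemma index?_eq_some_idxOf (xs : List Int) (v : Int) (h : v ∈ xs) :
    PySem.List.index? xs v = some (xs.idxOf v) := by
  have hs : (PySem.List.index? xs v).isSome := by
    rw [PySem.List.index?_isSome_iff]; exact h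
  obtain ⟨k, hk⟩ := Option.isSome_iff_exists.mp hs
  obtain ⟨hklen, hkv, hkmin⟩ := PySem.List.getElem_of_index?_eq_some hk
  have h1 : xs.idxOf v ≤ k := idxOf_le_of_getElem xs v k hklen hkv
  have h2 : ¬ xs.idxOf v < k := fun hc =>
    hkmin _ hc (List.getElem_idxOf (List.idxOf_lt_length_of_mem h))
  rw [hk]
  congr 1
  omega


lemma lru_ab_eq (ram ref_list : List Int) (hpre : ∀ v ∈ ram, v ∈ ref_list) :
    lru_index ram ref_list = lru_index_alt ram ref_list := by
  by_cases hram : ram = []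
  · subst hram; rfl
  · obtain ⟨x, hx⟩ := List.exists_mem_of_ne_nil ram hram
    obtain ⟨v, S, heq, hvn, -, hlenS, hmax⟩ :=
      lruScan_char (PySem.Set.ofList ram) (PySem.Set.nodup_ofList ram)
        ref_list.reverse PySem.Set.empty none
        List.nodup_nil (by intro y hy; simp [PySem.Set.empty] at hy)
        ⟨x, by rw [PySem.Set.mem_ofList]; exact hx, by simp [PySem.Set.empty]⟩
        (by intro w hw _
            rw [List.mem_reverse]
            exact hpre w (by rwa [PySem.Set.mem_ofList] at hw))
    simp only [PySem.Set.mem_ofList] at hvn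
    replace hmax : ∀ w ∈ ram, ref_list.reverse.idxOf w ≤ ref_list.reverse.idxOf v := by
      intro w hw
      exact hmax w (by rw [PySem.Set.mem_ofList]; exact hw) (by simp [PySem.Set.empty])
    set k := ram.idxOf v with hk_def
    have hklen : k < ram.length := List.idxOf_lt_length_of_mem hvn
    have hkv : ram[k] = v := List.getElem_idxOf hklen
    -- B returns the first position of v in ram
    have hlenN : S.length = (PySem.Set.ofList ram).length := by
      have h := hlenS
      unfold PySem.Set.len at h
      exact_mod_cast h
    have hB : lru_index_alt ram ref_list = (k : Int) := by
      unfold lru_index_alt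
      rw [if_neg hram]
      simp only [heq]
      rw [if_neg (by simp [PySem.Set.len, hlenN])]
      simp only [Option.getD_some]
      rw [index?_eq_some_idxOf ram v hvn]
      rfl
    -- A's loop is an argmin fold over enumerate ram
    have hA : lru_index ram ref_list =
        ((PySem.List.enumerate ram).foldl
          (argStep (fun w => PySem.List.len ref_list - 1 -
            (((PySem.List.index? ref_list.reverse w).getD 0 : Nat) : Int)))
          (-1, PySem.List.len ref_list)).1 := by
      unfold lru_index
      rw [PySem.List.enumerate_eq_map_pyRange ram 0, List.foldl_map]
      simp only [PySem.List.slice?_none_none_neg_one, Option.getD_some]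
      rfl
    set f : Int → Int := fun w => PySem.List.len ref_list - 1 -
      (((PySem.List.index? ref_list.reverse w).getD 0 : Nat) : Int) with hf_def
    have hfval : ∀ w ∈ ram, f w =
        (ref_list.length : Int) - 1 - (ref_list.reverse.idxOf w : Nat) := by
      intro w hw
      rw [hf_def]
      simp only [PySem.List.len_eq]
      rw [index?_eq_some_idxOf _ _ (by rw [List.mem_reverse]; exact hpre w hw)]
      rfl
    have hfv_lt : ∀ w ∈ ram, w ≠ v → ref_list.reverse.idxOf w = ref_list.reverse.idxOf v → False := by
      intro w hw hne hidx
      exact hne ((List.idxOf_inj (by rw [List.mem_reverse]; exact hpre w hw)).mp hidx)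
    have hdecomp : ram = ram.take k ++ v :: ram.drop (k + 1) := by
      conv_lhs => rw [← List.take_append_drop k ram]
      congr 1
      rw [List.drop_eq_getElem_cons hklen, hkv]
    have hst1 : f v <
        ((PySem.List.enumerate (ram.take k)).foldl (argStep f) (-1, PySem.List.len ref_list)).2 := by
      apply argfold_gt
      · rw [hfval v hvn, PySem.List.len_eq]
        omega
      · intro p hp
        rw [PySem.List.mem_enumerate_iff] at hp
        obtain ⟨j, hj, hpj⟩ := hp
        have hjk : j < k := by
          have := hj; rw [List.length_take] at this; omega
        have hjlen : j < ram.length := by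
          have := hj; rw [List.length_take] at this; omega
        have hp2 : p.2 = ram[j] := by
          rw [hpj]; simp [List.getElem_take]
        have hwram : ram[j] ∈ ram := List.getElem_mem hjlen
        have hne : ram[j] ≠ v := by
          intro hc
          have := idxOf_le_of_getElem ram v j hjlen hc
          omega
        have hlt : ref_list.reverse.idxOf ram[j] < ref_list.reverse.idxOf v := by
          rcases lt_or_eq_of_le (hmax ram[j] hwram) with h | h
          · exact h
          · exact absurd h (fun hc => hfv_lt ram[j] hwram hne hc)
        rw [hp2, hfval ram[j] hwram, hfval v hvn]
        omega
    have hcalc : ((PySem.List.enumerate ram).foldl (argStep f) (-1, PySem.List.len ref_list)).1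
        = (0 : Int) + (k : Int) := by
      conv_lhs => rw [hdecomp]
      rw [PySem.List.enumerate_append, List.length_take_of_le (le_of_lt hklen),
        PySem.List.enumerate_cons, List.foldl_append, List.foldl_cons]
      rw [show argStep f
          ((PySem.List.enumerate (ram.take k)).foldl (argStep f) (-1, PySem.List.len ref_list))
          ((0 : Int) + (k : Int), v) = ((0 : Int) + (k : Int), f v) from by
        simp only [argStep]
        rw [if_pos hst1]]
      rw [argfold_fix]
      · intro p hp
        rw [PySem.List.mem_enumerate_iff] at hp
        obtain ⟨j, hj, hpj⟩ := hp
        have hp2 : p.2 ∈ ram := by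
          rw [hpj]
          exact List.mem_of_mem_drop (List.getElem_mem hj)
        rw [hfval p.2 hp2, hfval v hvn]
        have := hmax p.2 hp2
        omega
    rw [hA, hcalc, hB]
    omega

-- ===== VERDICT (by name: the statement is the Claim_ definition above) =====
theorem lru_index_spec : Claim_equal_lru_index := by
  intro ram ref_list _ hpre
  unfold Spec_lru_index
  exact lru_ab_eq ram ref_list hpre
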